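-- pv_equiv track=rewrite | github.com/Elgedr/Python | TK/tk1/exam.py | max_duplicate
-- ===== SOURCE A (Python) =====
-- def max_duplicate(nums):
--     """Return the largest element which has at least one duplicate."""
--     numbers = []
--     for number in nums:
--         if nums.count(number) > 1:
--             numbers.append(number)
--         else:
--             pass
--     if len(numbers) == 0:
--         return None
--     numbers = set(numbers)
--     return max(numbers)
-- ===== SOURCE B (Python) =====
-- def max_duplicate(nums):
--     """Return the largest element which has at least one duplicate."""
--     s = sorted(nums)
--     best = None
--     for a, b in zip(s, s[1:]):
--         if a == b:
--             best = a
--     return best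
-- ===== Notes on version B (the rewrite author's own statement) =====
-- stated objective: faster
-- what changed: B sorts a copy of the list and scans adjacent pairs, recording the value of each equal pair; since the scan is ascending the last recorded value is the largest duplicate, replacing A's per-element nums.count scan plus set+max.
import Mathlib
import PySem

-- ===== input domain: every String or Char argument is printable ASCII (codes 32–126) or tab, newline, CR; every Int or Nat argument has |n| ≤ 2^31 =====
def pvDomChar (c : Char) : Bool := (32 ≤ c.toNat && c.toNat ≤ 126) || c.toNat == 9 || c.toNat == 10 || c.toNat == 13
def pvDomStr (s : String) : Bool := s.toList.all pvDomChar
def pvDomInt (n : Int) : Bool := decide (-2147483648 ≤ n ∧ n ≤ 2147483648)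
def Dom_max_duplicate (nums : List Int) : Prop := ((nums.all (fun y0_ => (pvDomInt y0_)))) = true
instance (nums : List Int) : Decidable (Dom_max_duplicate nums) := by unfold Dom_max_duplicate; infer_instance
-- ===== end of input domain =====

-- B sorts a copy of the list and records the value of each equal adjacent pair;
-- ascending order makes the last recorded value the largest duplicate (objective: faster).

-- ===== PORT A =====
def max_duplicate (nums : List Int) : Option Int :=
  let numbers := nums.foldl (fun numbers number =>
    if nums.count number > 1 then numbers ++ [number] else numbers) []
  if numbers.length = 0 then none
  else PySem.List.max? (PySem.Set.ofList numbers) (fun x => x)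

-- ===== PORT B =====
def max_duplicate_alt (nums : List Int) : Option Int :=
  let s := PySem.List.sorted nums (fun x => x) false
  (s.zip (PySem.List.slice s (some 1) none)).foldl
    (fun best p => if p.1 == p.2 then some p.1 else best) none

-- ===== PRECONDITION & SPEC =====
def Spec_max_duplicate (nums : List Int) (out : Option Int) : Prop := out = max_duplicate_alt nums
instance (nums : List Int) (out : Option Int) : Decidable (Spec_max_duplicate nums out) := by unfold Spec_max_duplicate; infer_instance

-- ===== CLAIM (what is proved, stated in full; the proofs are below) =====
def Claim_equal_max_duplicate : Prop := ∀ (nums : List Int), Dom_max_duplicate nums → Spec_max_duplicate nums (max_duplicate nums)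

-- ===== LEMMAS AND PROOFS =====

-- B's loop as a structural recursion over the sorted list
def pvAux : List Int → Option Int → Option Int
  | x :: y :: t, b => pvAux (y :: t) (if x = y then some x else b)
  | _, b => b

-- the values recorded by B's loop, in scan order
def pvAdj : List Int → List Int
  | x :: y :: t => (if x = y then [x] else []) ++ pvAdj (y :: t)
  | _ => []

-- "last element, with fallback"
def pvLastOr : List Int → Option Int → Option Int
  | [], b => b
  | x :: l, _ => pvLastOr l (some x)

theorem zip_tail_foldl_eq_pvAux (s : List Int) (b : Option Int) :
    (s.zip s.tail).foldl (fun best p => if p.1 == p.2 then some p.1 else best) b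
      = pvAux s b := by
  induction s generalizing b with
  | nil => rfl
  | cons x s' ih =>
    cases s' with
    | nil => rfl
    | cons y t =>
      rw [show (x :: y :: t).zip (x :: y :: t).tail = (x, y) :: (y :: t).zip (y :: t).tail from rfl,
        List.foldl_cons, ih]
      simp only [pvAux, beq_iff_eq]

theorem pvAux_eq_pvLastOr_pvAdj (s : List Int) (b : Option Int) :
    pvAux s b = pvLastOr (pvAdj s) b := by
  induction s generalizing b with
  | nil => rfl
  | cons x s' ih =>
    cases s' with
    | nil => rfl
    | cons y t =>
      by_cases h : x = y
      · simp [pvAux, pvAdj, h, ih, pvLastOr]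
      · simp [pvAux, pvAdj, h, ih]

theorem pvLastOr_some_of_sorted (t : List Int) (x : Int)
    (hub : ∀ y ∈ t, x ≤ y) (hp : t.Pairwise (· ≤ ·)) :
    pvLastOr t (some x) = some (t.foldl max x) := by
  induction t generalizing x with
  | nil => rfl
  | cons y t' ih =>
    have hxy : x ≤ y := hub y (by simp)
    rw [List.pairwise_cons] at hp
    have : x ⊔ y = y := by omega
    simp only [pvLastOr, List.foldl_cons, this]
    exact ih y hp.1 hp.2

theorem pvLastOr_eq_max? (l : List Int) (hp : l.Pairwise (· ≤ ·)) :
    pvLastOr l none = PySem.List.max? l (fun y => y) := by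
  cases l with
  | nil => rfl
  | cons x t =>
    rw [List.pairwise_cons] at hp
    rw [PySem.List.max?_id_cons]
    exact pvLastOr_some_of_sorted t x hp.1 hp.2

theorem pvAdj_sublist (s : List Int) : (pvAdj s).Sublist s := by
  induction s with
  | nil => simp [pvAdj]
  | cons x s' ih =>
    cases s' with
    | nil => simp [pvAdj]
    | cons y t =>
      by_cases h : x = y
      · simpa [pvAdj, h] using (ih.cons₂ x)
      · simpa [pvAdj, h] using (ih.cons x)

theorem mem_pvAdj_of_sorted (s : List Int) (hp : s.Pairwise (· ≤ ·)) (z : Int) :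
    z ∈ pvAdj s ↔ 2 ≤ s.count z := by
  induction s with
  | nil => simp [pvAdj]
  | cons x s' ih =>
    cases s' with
    | nil =>
      simp only [pvAdj, List.not_mem_nil, false_iff, List.count_cons, List.count_nil]
      split_ifs <;> omega
    | cons y t =>
      rw [List.pairwise_cons] at hp
      have ihz := ih hp.2
      have hmem : z ∈ pvAdj (x :: y :: t) ↔ ((x = y ∧ z = x) ∨ z ∈ pvAdj (y :: t)) := by
        by_cases h : x = y
        · simp only [pvAdj, if_pos h, List.singleton_append, List.mem_cons]
          constructor
          · rintro (h1 | h1)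
            exacts [Or.inl ⟨h, h1⟩, Or.inr h1]
          · rintro (⟨_, h1⟩ | h1)
            exacts [Or.inl h1, Or.inr h1]
        · simp [pvAdj, h]
      have hcount : (x :: y :: t).count z = (y :: t).count z + (if x = z then 1 else 0) := by
        simp [List.count_cons]
      by_cases hzx : z = x
      · by_cases hxy : x = y
        · -- x = y = z: both sides true
          have hzmem : z ∈ y :: t := by simp [← hxy, hzx]
          have h1 : 1 ≤ (y :: t).count z := List.one_le_count_iff.2 hzmem
          rw [hmem, hcount, if_pos hzx.symm]
          constructor
          · intro _; omega
          · intro _; exact Or.inl ⟨hxy, hzx⟩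
        · -- z = x ≠ y and sorted: z does not occur again, both sides false
          have hznot : z ∉ y :: t := by
            intro hm
            rcases List.mem_cons.1 hm with h1 | h1
            · exact hxy (hzx ▸ h1)
            · have h2 : z ≤ y := hzx ▸ hp.1 y (by simp)
              have h3 : y ≤ z := (List.pairwise_cons.1 hp.2).1 z h1
              exact hxy (hzx ▸ (le_antisymm h2 h3) : x = y)
          have hc0 : (y :: t).count z = 0 := List.count_eq_zero.2 hznot
          rw [hmem, hcount, hc0, if_pos hzx.symm, ihz, hc0]
          constructor
          · rintro (⟨h1, _⟩ | h1)
            · exact absurd h1 hxy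
            · omega
          · intro h1; omega
      · rw [hmem, hcount, if_neg (fun h => hzx h.symm), ihz]
        constructor
        · rintro (⟨_, h1⟩ | h1)
          · exact absurd h1 hzx
          · omega
        · intro h1; exact Or.inr (by omega)

theorem pvAdj_pairwise (s : List Int) (hp : s.Pairwise (· ≤ ·)) :
    (pvAdj s).Pairwise (· ≤ ·) := hp.sublist (pvAdj_sublist s)

-- two integer lists with the same elements have the same max? under the identity key
theorem max?_id_congr_mem (l₁ l₂ : List Int) (h : ∀ x, x ∈ l₁ ↔ x ∈ l₂) :
    PySem.List.max? l₁ (fun y => y) = PySem.List.max? l₂ (fun y => y) := by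
  cases h₁ : PySem.List.max? l₁ (fun y => y) with
  | none =>
    rw [PySem.List.max?_eq_none_iff] at h₁
    subst h₁
    rw [eq_comm, PySem.List.max?_eq_none_iff]
    cases l₂ with
    | nil => rfl
    | cons a t => exact absurd ((h a).2 (by simp)) (by simp)
  | some m =>
    cases h₂ : PySem.List.max? l₂ (fun y => y) with
    | none =>
      rw [PySem.List.max?_eq_none_iff] at h₂
      subst h₂
      exact absurd ((h m).1 (PySem.List.max?_mem h₁)) (by simp)
    | some m' =>
      have hm := PySem.List.max?_mem h₁
      have hm' := PySem.List.max?_mem h₂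
      have h1 := PySem.List.max?_isMax h₁ m' ((h m').2 hm')
      have h2 := PySem.List.max?_isMax h₂ m ((h m).1 hm)
      simp only at h1 h2
      exact congrArg some (le_antisymm h2 h1)

-- ===== VERDICT (by name: the statement is the Claim_ definition above) =====
theorem max_duplicate_spec : Claim_equal_max_duplicate := by
  intro nums _
  unfold Spec_max_duplicate max_duplicate max_duplicate_alt
  have hps : (PySem.List.sorted nums (fun x => x) false).Pairwise (· ≤ ·) :=
    PySem.List.sorted_pairwise nums (fun x => x)
  have hcnt : ∀ z, (PySem.List.sorted nums (fun x => x) false).count z = nums.count z :=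
    fun z => (PySem.List.sorted_perm nums (fun x => x) false).count z
  simp only [PySem.List.foldl_append_ite_eq_filter, List.nil_append,
    PySem.List.slice_from_one]
  rw [zip_tail_foldl_eq_pvAux, pvAux_eq_pvLastOr_pvAdj,
    pvLastOr_eq_max? _ (pvAdj_pairwise _ hps)]
  have hmemB : ∀ z, z ∈ pvAdj (PySem.List.sorted nums (fun x => x) false) ↔
      2 ≤ nums.count z := by
    intro z; rw [mem_pvAdj_of_sorted _ hps, hcnt]
  by_cases hF : nums.filter (fun x => decide (nums.count x > 1)) = []
  · rw [hF, if_pos (show ([] : List Int).length = 0 from rfl)]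
    have hnil : pvAdj (PySem.List.sorted nums (fun x => x) false) = [] := by
      rw [List.eq_nil_iff_forall_not_mem]
      intro z hz
      rw [hmemB] at hz
      have hzmem : z ∈ nums := List.one_le_count_iff.1 (by omega)
      have : z ∈ nums.filter (fun x => decide (nums.count x > 1)) :=
        List.mem_filter.2 ⟨hzmem, by simp; omega⟩
      simp [hF] at this
    rw [hnil]
    rfl
  · rw [if_neg (by simpa [List.length_eq_zero_iff] using hF)]
    apply max?_id_congr_mem
    intro z
    rw [PySem.Set.mem_ofList, List.mem_filter, hmemB]
    constructor
    · rintro ⟨_, h1⟩; simp at h1; omega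
    · intro h2
      exact ⟨List.one_le_count_iff.1 (by omega), by simp; omega⟩
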